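-- pv_equiv track=rewrite | github.com/alexa/alexa-skills-kit-sdk-for-python | ask-sdk-core/ask_sdk_core/api_client.py | _convert_list_tuples_to_dict
-- ===== SOURCE A (Python) =====
-- def _convert_list_tuples_to_dict(headers_list):
--     # type: (List[Tuple[str, str]]) -> Dict[str, str]
--     """Convert list of tuples from headers of request object to
--     dictionary format.
--
--     :param headers_list: List of tuples made up of two element
--         strings from `ApiClientRequest` headers variable
--     :type headers_list: List[Tuple[str, str]]
--     :return: Dictionary of headers in keys as strings and values
--         as comma separated strings
--     :rtype: Dict[str, str]
--     """
--     headers_dict = {}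
--     if headers_list is not None:
--         for header_tuple in headers_list:
--             key, value = header_tuple[0], header_tuple[1]
--             if key in headers_dict:
--                 headers_dict[key] = "{}, {}".format(
--                     headers_dict[key], value)
--             else:
--                 headers_dict[header_tuple[0]] = value
--     return headers_dict
-- ===== SOURCE B (Python) =====
-- def _convert_list_tuples_to_dict(headers_list):
--     """Collect the distinct keys in first-occurrence order, then for each key
--     gather all of its values from the original list and join them with ', '."""
--     if headers_list is None:
--         return {}
--     seen = []
--     for key, _ in headers_list:
--         if key not in seen:
--             seen.append(key)
--     return {key: ", ".join(value for k, value in headers_list if k == key)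
--             for key in seen}
-- ===== Notes on version B (the rewrite author's own statement) =====
-- stated objective: alternative
-- what changed: B drops the dict-with-membership-branch accumulation entirely: it first collects the distinct keys in first-occurrence order, then for each key filters its values out of the original list and joins them with ', ' (two staged passes over the input instead of one incremental dict update).
import Mathlib
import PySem

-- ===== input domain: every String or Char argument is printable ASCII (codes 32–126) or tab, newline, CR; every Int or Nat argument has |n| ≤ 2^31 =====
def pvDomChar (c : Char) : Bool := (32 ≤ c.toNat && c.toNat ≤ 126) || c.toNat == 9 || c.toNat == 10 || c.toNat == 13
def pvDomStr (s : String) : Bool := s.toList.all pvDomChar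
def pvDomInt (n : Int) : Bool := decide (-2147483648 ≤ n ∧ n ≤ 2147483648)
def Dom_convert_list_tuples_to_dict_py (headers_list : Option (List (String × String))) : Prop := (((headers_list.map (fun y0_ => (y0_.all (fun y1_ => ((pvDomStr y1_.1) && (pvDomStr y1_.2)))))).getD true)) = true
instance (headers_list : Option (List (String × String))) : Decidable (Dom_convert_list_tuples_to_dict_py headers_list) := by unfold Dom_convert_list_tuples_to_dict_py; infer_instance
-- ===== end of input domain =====

-- B replaces A's incremental dict accumulation (membership branch + string concatenation)
-- by two staged passes: collect distinct keys in first-occurrence order, then per key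
-- filter-and-join its values from the original list; alternative decomposition, not faster.

-- ===== PORT A =====
-- literal port of A: fold the tuples into a dict; if the key is present, overwrite with
-- "old, value" (the key is present, so getD with "" is exact for headers_dict[key]), else insert.
def convert_list_tuples_to_dict_py (headers_list : Option (List (String × String))) : List (String × String) :=
  (match headers_list with
   | none => (PySem.Dict.empty : PySem.Dict String String)
   | some l =>
     l.foldl (fun (d : PySem.Dict String String) (p : String × String) =>
       if d.contains p.1 then d.insert p.1 (d.getD p.1 "" ++ ", " ++ p.2)
       else d.insert p.1 p.2) PySem.Dict.empty).items

-- ===== PORT B =====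
-- literal port of B: first pass builds `seen`, the distinct keys in first-occurrence order
-- ('if key not in seen: seen.append(key)'); second pass builds, for each seen key, the
-- ', '-join of the values the original list holds under that key.
def convert_list_tuples_to_dict_py_alt (headers_list : Option (List (String × String))) : List (String × String) :=
  match headers_list with
  | none => []
  | some l =>
    let seen : List String :=
      l.foldl (fun (s : List String) (p : String × String) =>
        if p.1 ∈ s then s else s ++ [p.1]) []
    seen.map (fun k =>
      (k, PySem.Str.join ", " ((l.filter (fun p => p.1 == k)).map (fun p => p.2))))

-- ===== PRECONDITION & SPEC =====
def Spec_convert_list_tuples_to_dict_py (headers_list : Option (List (String × String))) (out : List (String × String)) : Prop := out = convert_list_tuples_to_dict_py_alt headers_list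
instance (headers_list : Option (List (String × String))) (out : List (String × String)) : Decidable (Spec_convert_list_tuples_to_dict_py headers_list out) := by unfold Spec_convert_list_tuples_to_dict_py; infer_instance

-- ===== CLAIM (what is proved, stated in full; the proofs are below) =====
def Claim_equal_convert_list_tuples_to_dict_py : Prop := ∀ (headers_list : Option (List (String × String))), Dom_convert_list_tuples_to_dict_py headers_list → Spec_convert_list_tuples_to_dict_py headers_list (convert_list_tuples_to_dict_py headers_list)

-- ===== LEMMAS AND PROOFS =====

-- ", ".join on strings: singleton and cons-with-nonempty-tail unfoldings.
theorem joinSingleton (v : String) : PySem.Str.join ", " [v] = v := by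
  rw [← String.toList_inj, PySem.Str.toList_join]
  simp [PySem.Chars.join_singleton]

theorem joinConsCons (v w : String) (vs : List String) :
    PySem.Str.join ", " (v :: w :: vs) = v ++ ", " ++ PySem.Str.join ", " (w :: vs) := by
  rw [← String.toList_inj, PySem.Str.toList_join]
  simp [PySem.Chars.join_cons_cons, PySem.Str.toList_join]

-- the running "acc = acc + ', ' + v" loop is ', '-join, shifted by the start value
theorem foldl_comma (vs : List String) : ∀ (a : String),
    vs.foldl (fun x w => x ++ ", " ++ w) a =
      if vs = [] then a else a ++ ", " ++ PySem.Str.join ", " vs := by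
  induction vs with
  | nil => intro a; simp
  | cons w vs ih =>
    intro a
    cases vs with
    | nil => simp [joinSingleton]
    | cons u vs' =>
      simp only [List.foldl_cons, ih, joinConsCons]
      simp [String.append_assoc]

-- one step of A's loop, written as a single insert
theorem stepA_eq (d : PySem.Dict String String) (p : String × String) :
    (if d.contains p.1 then d.insert p.1 (d.getD p.1 "" ++ ", " ++ p.2)
     else d.insert p.1 p.2) =
    d.insert p.1 (if d.contains p.1 then d.getD p.1 "" ++ ", " ++ p.2 else p.2) := by
  by_cases h : d.contains p.1 <;> simp [h]

-- the value A's dict holds at k after the loop, in terms of the filtered values of l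
theorem getA (l : List (String × String)) : ∀ (d : PySem.Dict String String) (k : String),
    (l.foldl (fun d p =>
        d.insert p.1 (if d.contains p.1 then d.getD p.1 "" ++ ", " ++ p.2 else p.2)) d).getD k "" =
      (if d.contains k
       then ((l.filter (fun p => p.1 == k)).map (fun p => p.2)).foldl
              (fun x w => x ++ ", " ++ w) (d.getD k "")
       else match (l.filter (fun p => p.1 == k)).map (fun p => p.2) with
            | [] => d.getD k ""
            | v :: vs => vs.foldl (fun x w => x ++ ", " ++ w) v) := by
  induction l with
  | nil => intro d k; by_cases h : d.contains k <;> simp [h]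
  | cons p t ih =>
    intro d k
    simp only [List.foldl_cons, ih]
    by_cases hk : p.1 = k
    · subst hk
      have hc : (d.insert p.1 (if d.contains p.1 then d.getD p.1 "" ++ ", " ++ p.2 else p.2)).contains p.1 = true :=
        PySem.Dict.contains_insert_self _ _ _
      rw [hc]
      by_cases h : d.contains p.1
      · simp [h, PySem.Dict.getD_insert_self]
      · simp [h, PySem.Dict.getD_insert_self]
    · have hne : k ≠ p.1 := fun h => hk h.symm
      have hc : (d.insert p.1 (if d.contains p.1 then d.getD p.1 "" ++ ", " ++ p.2 else p.2)).contains k = d.contains k := by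
        rw [PySem.Dict.contains_insert]
        simp [hne]
      have hg : (d.insert p.1 (if d.contains p.1 then d.getD p.1 "" ++ ", " ++ p.2 else p.2)).getD k "" = d.getD k "" :=
        PySem.Dict.getD_insert_of_ne _ _ _ hne
      have hf : List.filter (fun q => q.1 == k) (p :: t) = List.filter (fun q => q.1 == k) t := by
        simp [hk]
      rw [hc, hg, hf]

-- A's dict as the single-insert fold
theorem foldA_eq (l : List (String × String)) :
    l.foldl (fun (d : PySem.Dict String String) (p : String × String) =>
        if d.contains p.1 then d.insert p.1 (d.getD p.1 "" ++ ", " ++ p.2)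
        else d.insert p.1 p.2) PySem.Dict.empty =
    l.foldl (fun d p =>
        d.insert p.1 (if d.contains p.1 then d.getD p.1 "" ++ ", " ++ p.2 else p.2)) PySem.Dict.empty := by
  apply PySem.List.foldl_congr_mem
  intro d p _
  exact stepA_eq d p

-- B's `seen` loop is set(keys) in first-occurrence order
theorem seen_eq (l : List (String × String)) :
    l.foldl (fun (s : List String) (p : String × String) =>
        if p.1 ∈ s then s else s ++ [p.1]) [] =
    PySem.Set.ofList (l.map Prod.fst) := by
  rw [PySem.Set.ofList_eq_foldl, List.foldl_map]
  apply PySem.List.foldl_congr_mem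
  intro s p _
  by_cases h : p.1 ∈ s <;> simp [PySem.Set.add, h]

-- ===== VERDICT (by name: the statement is the Claim_ definition above) =====
theorem convert_list_tuples_to_dict_py_spec : Claim_equal_convert_list_tuples_to_dict_py := by
  intro headers_list _
  unfold Spec_convert_list_tuples_to_dict_py convert_list_tuples_to_dict_py
    convert_list_tuples_to_dict_py_alt
  cases headers_list with
  | none => rfl
  | some l =>
    simp only []
    rw [foldA_eq, seen_eq]
    have hkeys : (l.foldl (fun (d : PySem.Dict String String) p =>
        d.insert p.1 (if d.contains p.1 then d.getD p.1 "" ++ ", " ++ p.2 else p.2)) PySem.Dict.empty).keys =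
        PySem.Set.ofList (l.map Prod.fst) := by
      rw [PySem.Dict.keys_foldl_insert_key]
      simp [PySem.Dict.keys_empty, PySem.Set.update, PySem.Set.ofList_eq_foldl]
    have hnodup : (l.foldl (fun (d : PySem.Dict String String) p =>
        d.insert p.1 (if d.contains p.1 then d.getD p.1 "" ++ ", " ++ p.2 else p.2)) PySem.Dict.empty).keys.Nodup :=
      PySem.Dict.nodup_keys_foldl_insert_key l Prod.fst _ _ PySem.Dict.nodup_keys_empty
    rw [PySem.Dict.items_eq_map_keys _ hnodup "", hkeys]
    apply List.map_congr_left
    intro k hk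
    have hmem : k ∈ l.map Prod.fst := by
      exact (PySem.List.mem_dedup (l.map Prod.fst) k).mp hk
    have hval : (l.foldl (fun (d : PySem.Dict String String) p =>
        d.insert p.1 (if d.contains p.1 then d.getD p.1 "" ++ ", " ++ p.2 else p.2)) PySem.Dict.empty).getD k "" =
        match (l.filter (fun p => p.1 == k)).map (fun p => p.2) with
        | [] => ""
        | v :: vs => vs.foldl (fun x w => x ++ ", " ++ w) v := by
      rw [getA]
      simp [PySem.Dict.contains_empty, PySem.Dict.getD_empty]
    rw [hval]
    obtain ⟨p, hp, hpk⟩ := List.mem_map.mp hmem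
    have hfne : (l.filter (fun q => q.1 == k)).map (fun q => q.2) ≠ [] := by
      have : p ∈ l.filter (fun q => q.1 == k) :=
        List.mem_filter.mpr ⟨hp, by simp [hpk]⟩
      intro hcon
      rcases List.map_eq_nil_iff.mp hcon with h
      simp [h] at this
    cases hvs : (l.filter (fun q => q.1 == k)).map (fun q => q.2) with
    | nil => exact absurd hvs hfne
    | cons v vs =>
      show (k, vs.foldl (fun x w => x ++ ", " ++ w) v) = (k, PySem.Str.join ", " (v :: vs))
      rw [foldl_comma]
      cases vs with
      | nil => simp [joinSingleton]
      | cons u vs' => simp [joinConsCons]
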